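-- pv_equiv track=rewrite | github.com/rsprenkels/kattis | python/2_0/register.py | solution
-- ===== SOURCE A (Python) =====
-- import math
-- from typing import List
--
-- def solution(registers: List[int]) -> int:
--     reg_size = [2,3,5,7,11,13,17,19]
--     incs_possible = 0
--     for ndx in range(len(registers)):
--         cur_incs_possible = reg_size[ndx] - 1 - registers[ndx]
--         if ndx > 0:
--             multiplier = math.prod(reg_size[n] for n in range(ndx))
--             cur_incs_possible *= multiplier
--         incs_possible += cur_incs_possible
--     return incs_possible
-- ===== SOURCE B (Python) =====
-- from typing import List
--
-- def solution(registers: List[int]) -> int: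
--     reg_size = [2, 3, 5, 7, 11, 13, 17, 19]
--     total = 0
--     mult = 1
--     for ndx, r in enumerate(registers):
--         total += mult * (reg_size[ndx] - 1 - r)
--         mult *= reg_size[ndx]
--     return total
-- ===== Notes on version B (the rewrite author's own statement) =====
-- stated objective: simpler
-- what changed: B threads a single running prefix-product multiplier through one accumulator loop, instead of A's per-index math.prod recomputation of the prefix product and its ndx>0 branch.
import Mathlib
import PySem

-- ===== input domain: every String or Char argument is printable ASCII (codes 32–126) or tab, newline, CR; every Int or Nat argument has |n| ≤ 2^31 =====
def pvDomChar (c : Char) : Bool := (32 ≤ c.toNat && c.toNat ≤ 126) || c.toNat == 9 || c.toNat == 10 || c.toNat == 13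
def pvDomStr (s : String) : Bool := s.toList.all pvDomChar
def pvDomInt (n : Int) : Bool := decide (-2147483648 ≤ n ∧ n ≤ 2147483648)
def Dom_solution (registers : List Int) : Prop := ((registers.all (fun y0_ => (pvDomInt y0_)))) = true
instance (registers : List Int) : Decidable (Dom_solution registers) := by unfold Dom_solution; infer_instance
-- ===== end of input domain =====

-- B replaces A's per-index math.prod prefix-product recomputation (and its ndx>0 branch) by one
-- enumerate loop threading a running multiplier; objective: simpler. Like A, B indexes reg_size
-- at each register index, so both raise IndexError on lists longer than 8 (outside Pre_).

-- ===== PORT A =====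
-- reg_size = [2,3,5,7,11,13,17,19]
def pvRegSize : List Int := [2, 3, 5, 7, 11, 13, 17, 19]

-- literal port of A; pyGetD … 0 stands for list indexing whose IndexError case is excluded by Pre_
def solution (registers : List Int) : Int :=
  (PySem.List.pyRange 0 (PySem.List.len registers) 1).foldl
    (fun incs_possible ndx =>
      let cur := PySem.List.pyGetD pvRegSize ndx 0 - 1 - PySem.List.pyGetD registers ndx 0
      let cur := if ndx > 0 then
          cur * ((PySem.List.pyRange 0 ndx 1).foldl (fun p n => p * PySem.List.pyGetD pvRegSize n 0) 1)
        else cur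
      incs_possible + cur) 0

-- ===== PORT B =====
def solution_alt (registers : List Int) : Int :=
  ((PySem.List.enumerate registers).foldl
    (fun (st : Int × Int) p =>
      (st.1 + st.2 * (PySem.List.pyGetD pvRegSize p.1 0 - 1 - p.2),
       st.2 * PySem.List.pyGetD pvRegSize p.1 0)) (0, 1)).1

-- ===== PRECONDITION & SPEC =====
-- Both A and B index reg_size (length 8) at every register index and raise IndexError on longer lists.
def Pre_solution (registers : List Int) : Prop := registers.length ≤ 8
instance (registers : List Int) : Decidable (Pre_solution registers) := by unfold Pre_solution; infer_instance
def pvWitness_solution : List Int := [1, 0, 3]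

def Spec_solution (registers : List Int) (out : Int) : Prop := out = solution_alt registers
instance (registers : List Int) (out : Int) : Decidable (Spec_solution registers out) := by unfold Spec_solution; infer_instance

-- ===== CLAIM =====
def Claim_equal_solution : Prop := ∀ (registers : List Int), Dom_solution registers → Pre_solution registers → Spec_solution registers (solution registers)

-- ===== LEMMAS AND PROOFS =====

-- ===== VERDICT =====
theorem solution_spec : Claim_equal_solution := by
  intro registers _ hpre
  unfold Spec_solution
  rcases registers with _ | ⟨a, _ | ⟨b, _ | ⟨c, _ | ⟨d, _ | ⟨e, _ | ⟨f, _ | ⟨g, _ | ⟨h, _ | ⟨i, t⟩⟩⟩⟩⟩⟩⟩⟩⟩ <;>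
    first
      | (exfalso; simp [Pre_solution, List.length] at hpre; omega)
      | (simp [solution, solution_alt, pvRegSize, PySem.List.pyRange, PySem.List.len, List.range_succ,
               PySem.List.enumerate, PySem.List.pyGetD, PySem.List.pyGet?, PySem.List.pyIdx?]; try ring)
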